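-- pv_equiv track=rewrite | github.com/open-mmlab/Amphion | models/tts/maskgct/g2p/g2p/japanese.py | g2phone_tone_wo_punct
-- ===== SOURCE A (Python) =====
-- def fix_phone_tone(phone_tone_list: list[tuple[str, int]]) -> list[tuple[str, int]]:
--     """
--     `phone_tone_list`のtone（アクセントの値）を0か1の範囲に修正する。
--     例: [(a, 0), (i, -1), (u, -1)] → [(a, 1), (i, 0), (u, 0)]
--     """
--     tone_values = set(tone for _, tone in phone_tone_list)
--     if len(tone_values) == 1:
--         assert tone_values == {0}, tone_values
--         return phone_tone_list
--     elif len(tone_values) == 2: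
--         if tone_values == {0, 1}:
--             return phone_tone_list
--         elif tone_values == {-1, 0}:
--             return [
--                 (letter, 0 if tone == -1 else 1) for letter, tone in phone_tone_list
--             ]
--         else:
--             raise ValueError(f"Unexpected tone values: {tone_values}")
--     else:
--         raise ValueError(f"Unexpected tone values: {tone_values}")
--
-- def g2phone_tone_wo_punct(prosodies) -> list[tuple[str, int]]:
--     """
--     テキストに対して、音素とアクセント（0か1）のペアのリストを返す。
--     ただし「!」「.」「?」等の非音素記号(punctuation)は全て消える（ポーズ記号も残さない）。
--     非音素記号を含める処理は`align_tones()`で行われる。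
--     また「っ」は「cl」でなく「q」に変換される（「ん」は「N」のまま）。
--     例: "こんにちは、世界ー。。元気？！" →
--     [('k', 0), ('o', 0), ('N', 1), ('n', 1), ('i', 1), ('ch', 1), ('i', 1), ('w', 1), ('a', 1), ('s', 1), ('e', 1), ('k', 0), ('a', 0), ('i', 0), ('i', 0), ('g', 1), ('e', 1), ('N', 0), ('k', 0), ('i', 0)]
--     """
--     result: list[tuple[str, int]] = []
--     current_phrase: list[tuple[str, int]] = []
--     current_tone = 0
--     last_accent = ""
--     for i, letter in enumerate(prosodies):
--         # 特殊記号の処理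
--
--         # 文頭記号、無視する
--         if letter == "^":
--             assert i == 0, "Unexpected ^"
--         # アクセント句の終わりに来る記号
--         elif letter in ("$", "?", "_", "#"):
--             # 保持しているフレーズを、アクセント数値を0-1に修正し結果に追加
--             result.extend(fix_phone_tone(current_phrase))
--             # 末尾に来る終了記号、無視（文中の疑問文は`_`になる）
--             if letter in ("$", "?"):
--                 assert i == len(prosodies) - 1, f"Unexpected {letter}"
--             # あとは"_"（ポーズ）と"#"（アクセント句の境界）のみ
--             # これらは残さず、次のアクセント句に備える。
--
--             current_phrase = []
--             # 0を基準点にしてそこから上昇・下降する（負の場合は上の`fix_phone_tone`で直る）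
--             current_tone = 0
--             last_accent = ""
--         # アクセント上昇記号
--         elif letter == "[":
--             if last_accent != letter:
--                 current_tone = current_tone + 1
--             last_accent = letter
--         # アクセント下降記号
--         elif letter == "]":
--             if last_accent != letter:
--                 current_tone = current_tone - 1
--             last_accent = letter
--         # それ以外は通常の音素
--         else:
--             if letter == "cl":  # 「っ」の処理
--                 letter = "q"
--             current_phrase.append((letter, current_tone))
--     return result
-- ===== SOURCE B (Python) =====
-- _BOUNDARIES = ("$", "?", "_", "#")
--
--
-- def _split_phrases(tokens):
--     """Split into accent phrases, one per boundary marker; tokens after the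
--     last boundary never reach the output."""
--     phrases, cur = [], []
--     for t in tokens:
--         if t in _BOUNDARIES:
--             phrases.append(cur)
--             cur = []
--         else:
--             cur.append(t)
--     return phrases
--
--
-- def _phrase_phone_tones(seg):
--     tone, last, out = 0, "", []
--     for t in seg:
--         if t == "[":
--             if last != "[":
--                 tone += 1
--             last = "["
--         elif t == "]":
--             if last != "]":
--                 tone -= 1
--             last = "]"
--         else:
--             out.append(("q" if t == "cl" else t, tone))
--     return out
--
--
-- def _normalize(pt):
--     if any(t == -1 for _, t in pt):
--         return [(p, 0 if t == -1 else 1) for p, t in pt]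
--     return pt
--
--
-- def g2phone_tone_wo_punct(prosodies) -> list[tuple[str, int]]:
--     tokens = prosodies[1:] if prosodies[:1] == ["^"] else prosodies
--     out = []
--     for seg in _split_phrases(tokens):
--         out.extend(_normalize(_phrase_phone_tones(seg)))
--     return out
-- ===== Notes on version B (the rewrite author's own statement) =====
-- stated objective: alternative
-- what changed: B first splits the token sequence into accent-phrase segments at the boundary markers $/?/_/# (dropping a leading ^), then converts and tone-normalizes each segment independently and concatenates, instead of A's single stateful pass that interleaves assertion checks, accumulation and in-loop flushing; Pre_ excludes exactly the inputs on which A raises (misplaced ^ or terminal markers, or a flushed phrase whose tone set is not {0}, {0,1} or {-1,0}, including empty phrases).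
import Mathlib
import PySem

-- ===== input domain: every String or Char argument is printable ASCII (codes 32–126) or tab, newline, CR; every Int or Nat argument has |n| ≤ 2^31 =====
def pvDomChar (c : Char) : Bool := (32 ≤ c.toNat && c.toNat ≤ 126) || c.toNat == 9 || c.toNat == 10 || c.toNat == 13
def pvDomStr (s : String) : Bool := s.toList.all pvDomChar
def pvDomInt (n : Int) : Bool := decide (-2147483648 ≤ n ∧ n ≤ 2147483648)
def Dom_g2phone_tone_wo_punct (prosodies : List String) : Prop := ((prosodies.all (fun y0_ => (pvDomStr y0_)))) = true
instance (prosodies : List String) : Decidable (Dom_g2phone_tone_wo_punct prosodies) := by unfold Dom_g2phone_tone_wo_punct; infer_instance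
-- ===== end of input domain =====

-- B splits the token list into accent-phrase segments at the boundary markers first and
-- converts/normalizes each segment independently, instead of A's single stateful pass
-- (objective: alternative decomposition, same cost).


-- ===== PORT A =====

-- Python set equality `s == t` on two distinct-element lists (PySem.Set values / literals)
def pySetEq (s t : List Int) : Bool := s.all t.contains && t.all s.contains

-- fix_phone_tone; `none` = the AssertionError / ValueError branches
def fixPhoneTone (pt : List (String × Int)) : Option (List (String × Int)) :=
  let tones : PySem.Set Int := PySem.Set.ofList (pt.map Prod.snd)
  if tones.length = 1 then
    if pySetEq tones [0] then some pt else none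
  else if tones.length = 2 then
    if pySetEq tones [0, 1] then some pt
    else if pySetEq tones [-1, 0] then
      some (pt.map fun lt => (lt.1, if lt.2 = -1 then (0 : Int) else 1))
    else none
  else none

-- the `for i, letter in enumerate(prosodies)` loop; `none` = an assert fails or
-- fix_phone_tone raises; state = (result, current_phrase, current_tone, last_accent)
def aLoop (n : Nat) : Nat → List String → List (String × Int) → List (String × Int) → Int → String → Option (List (String × Int))
  | _, [], result, _, _, _ => some result
  | i, letter :: rest, result, phrase, tone, last =>
    if letter = "^" then
      if i = 0 then aLoop n (i + 1) rest result phrase tone last else none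
    else if letter = "$" ∨ letter = "?" ∨ letter = "_" ∨ letter = "#" then
      match fixPhoneTone phrase with
      | none => none
      | some fp =>
        if (letter = "$" ∨ letter = "?") ∧ i ≠ n - 1 then none
        else aLoop n (i + 1) rest (result ++ fp) [] 0 ""
    else if letter = "[" then
      aLoop n (i + 1) rest result phrase (if last = "[" then tone else tone + 1) "["
    else if letter = "]" then
      aLoop n (i + 1) rest result phrase (if last = "]" then tone else tone - 1) "]"
    else
      aLoop n (i + 1) rest result (phrase ++ [(if letter = "cl" then "q" else letter, tone)]) tone last

def g2phone_tone_wo_punct (prosodies : List String) : List (String × Int) :=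
  -- `.getD []` is never reached under Pre_ (there A returns normally)
  (aLoop prosodies.length 0 prosodies [] [] 0 "").getD []

-- ===== PORT B =====

def bBoundary (s : String) : Bool := s == "$" || s == "?" || s == "_" || s == "#"

-- _split_phrases: one segment per boundary marker; trailing tokens dropped
def bChunksAux : List String → List String → List (List String)
  | _, [] => []
  | cur, t :: rest =>
    if bBoundary t then cur :: bChunksAux [] rest else bChunksAux (cur ++ [t]) rest

-- _phrase_phone_tones loop body; state = (tone, last, out)
def bStep (st : Int × String × List (String × Int)) (t : String) : Int × String × List (String × Int) :=
  if t = "[" then (if st.2.1 = "[" then st.1 else st.1 + 1, "[", st.2.2)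
  else if t = "]" then (if st.2.1 = "]" then st.1 else st.1 - 1, "]", st.2.2)
  else (st.1, st.2.1, st.2.2 ++ [(if t = "cl" then "q" else t, st.1)])

def bSegPhones (seg : List String) : List (String × Int) :=
  (seg.foldl bStep (0, "", [])).2.2

def bNormalize (pt : List (String × Int)) : List (String × Int) :=
  if pt.any (fun lt => lt.2 = -1) then
    pt.map fun lt => (lt.1, if lt.2 = -1 then (0 : Int) else 1)
  else pt

def g2phone_tone_wo_punct_alt (prosodies : List String) : List (String × Int) :=
  -- prosodies[:1] == ["^"] / prosodies[1:] are exactly take/tail on a list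
  let tokens := if prosodies.take 1 = ["^"] then prosodies.tail else prosodies
  ((bChunksAux [] tokens).map fun seg => bNormalize (bSegPhones seg)).flatten

-- ===== PRECONDITION & SPEC =====

-- Pre_ helpers (independent of both ports): per-phrase tone sequences and validity
def pvBoundary (s : String) : Bool := s == "$" || s == "?" || s == "_" || s == "#"

def pvToneStep (st : Int × String × List Int) (t : String) : Int × String × List Int :=
  if t = "[" then (if st.2.1 = "[" then st.1 else st.1 + 1, "[", st.2.2)
  else if t = "]" then (if st.2.1 = "]" then st.1 else st.1 - 1, "]", st.2.2)
  else (st.1, st.2.1, st.2.2 ++ [st.1])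

def pvSegTones (seg : List String) : List Int := (seg.foldl pvToneStep (0, "", [])).2.2

-- fix_phone_tone succeeds exactly when the phrase is nonempty and its tone set is {0}, {0,1} or {-1,0}
def pvValidTones (ts : List Int) : Bool :=
  !ts.isEmpty &&
  (ts.all (· == 0) ||
   (ts.all (fun t => t == 0 || t == 1) && ts.contains 0 && ts.contains 1) ||
   (ts.all (fun t => t == -1 || t == 0) && ts.contains 0 && ts.contains (-1)))

-- Pre_ holds exactly when A returns normally: "^" only at index 0, "$"/"?" only at the
-- final index, and every flushed accent phrase has a tone set fix_phone_tone accepts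
-- ({0}, {0,1} or {-1,0}; in particular no empty phrase). Outside Pre_, A raises
-- AssertionError or ValueError.
def Pre_g2phone_tone_wo_punct (prosodies : List String) : Prop :=
  let toks := if prosodies.take 1 = ["^"] then prosodies.tail else prosodies
  "^" ∉ toks ∧
  (∀ (i : Nat) (h : i < toks.length), (toks[i] = "$" ∨ toks[i] = "?") → i = toks.length - 1) ∧
  ∀ s ∈ (toks.splitOnP pvBoundary).dropLast, pvValidTones (pvSegTones s) = true

instance (prosodies : List String) : Decidable (Pre_g2phone_tone_wo_punct prosodies) := by
  unfold Pre_g2phone_tone_wo_punct; infer_instance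

def pvWitness_g2phone_tone_wo_punct : List String := ["^", "k", "o", "[", "N", "]", "i", "_", "a", "$"]

def Spec_g2phone_tone_wo_punct (prosodies : List String) (out : List (String × Int)) : Prop := out = g2phone_tone_wo_punct_alt prosodies
instance (prosodies : List String) (out : List (String × Int)) : Decidable (Spec_g2phone_tone_wo_punct prosodies out) := by unfold Spec_g2phone_tone_wo_punct; infer_instance

-- ===== CLAIM (what is proved, stated in full; the proofs are below) =====
def Claim_equal_g2phone_tone_wo_punct : Prop := ∀ (prosodies : List String), Dom_g2phone_tone_wo_punct prosodies → Pre_g2phone_tone_wo_punct prosodies → Spec_g2phone_tone_wo_punct prosodies (g2phone_tone_wo_punct prosodies)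

-- ===== LEMMAS AND PROOFS =====

-- proof-side recursive forms of the two structural conditions of Pre_
def pvChunks : List String → List String → List (List String)
  | _, [] => []
  | cur, t :: rest =>
    if pvBoundary t then cur :: pvChunks [] rest else pvChunks (cur ++ [t]) rest

def pvTermOk : List String → Bool
  | [] => true
  | t :: rest => if t == "$" || t == "?" then rest.isEmpty else pvTermOk rest

-- definitional unfolding lemmas
theorem pvChunks_cons (cur : List String) (t : String) (rest : List String) :
    pvChunks cur (t :: rest) =
      if pvBoundary t = true then cur :: pvChunks [] rest else pvChunks (cur ++ [t]) rest := rfl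

theorem pvTermOk_cons (t : String) (rest : List String) :
    pvTermOk (t :: rest) = if (t == "$" || t == "?") = true then rest.isEmpty else pvTermOk rest := rfl

theorem splitOnP_ne_nil (l : List String) : l.splitOnP pvBoundary ≠ [] := by
  induction l with
  | nil => simp [List.splitOnP_nil]
  | cons t rest ih =>
    rw [List.splitOnP_cons]
    split_ifs
    · simp
    · rcases h : rest.splitOnP pvBoundary with _ | ⟨a, tl⟩
      · exact absurd h ih
      · simp

theorem splitOnP_dropLast_eq_pvChunks :
    ∀ (l cur : List String),
      ((l.splitOnP pvBoundary).modifyHead (cur ++ ·)).dropLast = pvChunks cur l := by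
  intro l
  induction l with
  | nil => intro cur; simp [List.splitOnP_nil, pvChunks]
  | cons t rest ih =>
    intro cur
    rw [List.splitOnP_cons, pvChunks_cons]
    split_ifs with hb
    · rcases h : rest.splitOnP pvBoundary with _ | ⟨a, tl⟩
      · exact absurd h (splitOnP_ne_nil rest)
      · have hih := ih []
        rw [h] at hih
        simp only [List.modifyHead_cons, List.nil_append] at hih
        simp only [List.modifyHead_cons, List.append_nil,
          List.dropLast_cons_of_ne_nil (l := a :: tl) (by simp), hih]
    · rcases h : rest.splitOnP pvBoundary with _ | ⟨a, tl⟩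
      · exact absurd h (splitOnP_ne_nil rest)
      · have hih := ih (cur ++ [t])
        rw [h] at hih
        simpa using hih

theorem splitOnP_dropLast_eq_pvChunks' (l : List String) :
    (l.splitOnP pvBoundary).dropLast = pvChunks [] l := by
  have h := splitOnP_dropLast_eq_pvChunks l []
  rcases hs : l.splitOnP pvBoundary with _ | ⟨a, tl⟩
  · exact absurd hs (splitOnP_ne_nil l)
  · rw [hs] at h
    simpa using h

theorem termOk_of_idx :
    ∀ (l : List String),
      (∀ (i : Nat) (h : i < l.length), (l[i] = "$" ∨ l[i] = "?") → i = l.length - 1) →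
      pvTermOk l = true := by
  intro l
  induction l with
  | nil => intro _; rfl
  | cons t rest ih =>
    intro hidx
    rw [pvTermOk_cons]
    split_ifs with hb
    · have ht : t = "$" ∨ t = "?" := by
        rcases Bool.or_eq_true_iff.mp hb with h | h
        · exact Or.inl (by simpa using h)
        · exact Or.inr (by simpa using h)
      have h0 := hidx 0 (by simp) (by simpa using ht)
      simp only [List.length_cons] at h0
      have hr0 : rest.length = 0 := by omega
      simpa [List.isEmpty_iff] using List.eq_nil_of_length_eq_zero hr0
    · exact ih fun i h hi => by
        have := hidx (i + 1) (by simpa using Nat.succ_lt_succ h) (by simpa using hi)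
        simp only [List.length_cons] at this ⊢
        omega

theorem aLoop_nil (n i : Nat) (R P : List (String × Int)) (c : Int) (l : String) :
    aLoop n i [] R P c l = some R := rfl

theorem aLoop_cons (n i : Nat) (letter : String) (rest : List String)
    (R P : List (String × Int)) (c : Int) (l : String) :
    aLoop n i (letter :: rest) R P c l =
      (if letter = "^" then
        if i = 0 then aLoop n (i + 1) rest R P c l else none
      else if letter = "$" ∨ letter = "?" ∨ letter = "_" ∨ letter = "#" then
        match fixPhoneTone P with
        | none => none
        | some fp =>
          if (letter = "$" ∨ letter = "?") ∧ i ≠ n - 1 then none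
          else aLoop n (i + 1) rest (R ++ fp) [] 0 ""
      else if letter = "[" then
        aLoop n (i + 1) rest R P (if l = "[" then c else c + 1) "["
      else if letter = "]" then
        aLoop n (i + 1) rest R P (if l = "]" then c else c - 1) "]"
      else
        aLoop n (i + 1) rest R (P ++ [(if letter = "cl" then "q" else letter, c)]) c l) := rfl

-- first-boundary decomposition (proof-only helper)
def splitFirst : List String → Option (List String × String × List String)
  | [] => none
  | t :: rest =>
    if pvBoundary t then some ([], t, rest)
    else
      match splitFirst rest with
      | none => none
      | some (s, b, r) => some (t :: s, b, r)

theorem splitFirst_none {l : List String} (h : splitFirst l = none) :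
    ∀ t ∈ l, pvBoundary t = false := by
  induction l with
  | nil => intro t ht; cases ht
  | cons a rest ih =>
    intro t ht
    unfold splitFirst at h
    by_cases hb : pvBoundary a = true
    · simp [hb] at h
    · simp only [Bool.not_eq_true] at hb
      simp only [hb] at h
      rcases List.mem_cons.mp ht with rfl | hmem
      · simpa using hb
      · rcases hr : splitFirst rest with _ | ⟨⟨s1, b1, r1⟩⟩
        · exact ih hr t hmem
        · simp [hr] at h

theorem splitFirst_some {l : List String} {s : List String} {b : String} {r : List String}
    (h : splitFirst l = some (s, b, r)) :
    l = s ++ b :: r ∧ (∀ t ∈ s, pvBoundary t = false) ∧ pvBoundary b = true := by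
  induction l generalizing s with
  | nil => simp [splitFirst] at h
  | cons a rest ih =>
    unfold splitFirst at h
    by_cases hb : pvBoundary a = true
    · simp only [hb, if_pos] at h
      obtain ⟨rfl, rfl, rfl⟩ : s = [] ∧ a = b ∧ rest = r := by
        simpa [Prod.ext_iff] using h
      exact ⟨rfl, fun t ht => absurd ht (by simp), hb⟩
    · simp only [Bool.not_eq_true] at hb
      simp only [hb] at h
      rcases hr : splitFirst rest with _ | ⟨⟨s1, b1, r1⟩⟩
      · simp [hr] at h
      · simp only [hr] at h
        obtain ⟨hs, hbb, hrr⟩ : a :: s1 = s ∧ b1 = b ∧ r1 = r := by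
          simpa [Prod.ext_iff] using h
        subst hs; subst hbb; subst hrr
        obtain ⟨h1, h2, h3⟩ := ih hr
        refine ⟨by simp [h1], ?_, h3⟩
        intro t ht
        rcases List.mem_cons.mp ht with rfl | hmem
        · simpa using hb
        · exact h2 t hmem

theorem bChunks_eq_pvChunks : ∀ (cur l : List String), bChunksAux cur l = pvChunks cur l := by
  intro cur l
  induction l generalizing cur with
  | nil => rfl
  | cons a rest ih =>
    unfold bChunksAux pvChunks bBoundary pvBoundary
    by_cases h : (a == "$" || a == "?" || a == "_" || a == "#") = true
    · simp [h, ih]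
    · simp [h, ih]

theorem pvChunks_noB {l : List String} (h : ∀ t ∈ l, pvBoundary t = false) (cur : List String) :
    pvChunks cur l = [] := by
  induction l generalizing cur with
  | nil => rfl
  | cons a rest ih =>
    rw [pvChunks_cons, h a (by simp), if_neg (by simp)]
    exact ih (fun t ht => h t (by simp [ht])) _

theorem pvChunks_split {seg : List String} {b : String} (hseg : ∀ t ∈ seg, pvBoundary t = false)
    (hb : pvBoundary b = true) (cur : List String) (rest : List String) :
    pvChunks cur (seg ++ b :: rest) = (cur ++ seg) :: pvChunks [] rest := by
  induction seg generalizing cur with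
  | nil => simp [pvChunks, hb]
  | cons a s ih =>
    have ha := hseg a (by simp)
    rw [List.cons_append, pvChunks_cons, ha, if_neg (by simp),
      ih (fun t ht => hseg t (by simp [ht])) (cur ++ [a])]
    simp

theorem pvTermOk_skip {seg : List String} (hseg : ∀ t ∈ seg, pvBoundary t = false)
    (l : List String) : pvTermOk (seg ++ l) = pvTermOk l := by
  induction seg with
  | nil => rfl
  | cons a s ih =>
    have ha := hseg a (by simp)
    have h1 : (a == "$" || a == "?") = false := by
      simp only [pvBoundary] at ha
      rcases Bool.or_eq_false_iff.mp ha with ⟨h2, _⟩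
      rcases Bool.or_eq_false_iff.mp h2 with ⟨h3, _⟩
      exact h3
    rw [List.cons_append, pvTermOk_cons, h1, if_neg (by simp)]
    exact ih (fun t ht => hseg t (by simp [ht]))

-- tone fold = map snd of the phone fold
theorem toneStep_eq_bStep : ∀ (seg : List String) (c : Int) (l : String) (out : List (String × Int)),
    seg.foldl pvToneStep (c, l, out.map Prod.snd) =
      ((seg.foldl bStep (c, l, out)).1, (seg.foldl bStep (c, l, out)).2.1,
        ((seg.foldl bStep (c, l, out)).2.2).map Prod.snd) := by
  intro seg
  induction seg with
  | nil => intro c l out; rfl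
  | cons t rest ih =>
    intro c l out
    simp only [List.foldl_cons]
    by_cases h1 : t = "["
    · simp only [pvToneStep, bStep, h1, if_pos]
      exact ih _ _ _
    · by_cases h2 : t = "]"
      · simp only [pvToneStep, bStep, h2, if_pos]
        exact ih _ _ _
      · simp only [pvToneStep, bStep, if_neg h1, if_neg h2]
        have : (out ++ [((if t = "cl" then "q" else t), c)]).map Prod.snd = out.map Prod.snd ++ [c] := by simp
        rw [← this]
        exact ih _ _ _

theorem segTones_eq (seg : List String) : pvSegTones seg = (bSegPhones seg).map Prod.snd := by
  unfold pvSegTones bSegPhones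
  have := toneStep_eq_bStep seg 0 "" []
  simp only [List.map_nil] at this
  rw [this]

theorem nodup_two {α : Type} {l : List α} {u v : α} (hnd : l.Nodup)
    (hall : ∀ x ∈ l, x = u ∨ x = v) (hu : u ∈ l) (hv : v ∈ l) (huv : u ≠ v) :
    l = [u, v] ∨ l = [v, u] := by
  match l with
  | [] => cases hu
  | [a] =>
    simp only [List.mem_singleton] at hu hv
    exact absurd (hu.trans hv.symm) huv
  | a :: b :: rest =>
    rw [List.nodup_cons, List.nodup_cons] at hnd
    obtain ⟨ha1, hb1, _⟩ := hnd
    have hab : a ≠ b := fun h => ha1 (by simp [h])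
    have har : a ∉ rest := fun h => ha1 (by simp [h])
    have hrest : rest = [] := by
      rcases rest with _ | ⟨x, xs⟩
      · rfl
      · exfalso
        have hx := hall x (by simp)
        have ha := hall a (by simp)
        have hb := hall b (by simp)
        rcases ha with rfl | rfl <;> rcases hb with rfl | rfl <;>
          rcases hx with rfl | rfl <;> simp_all
    subst hrest
    have ha := hall a (by simp)
    have hb := hall b (by simp)
    rcases ha with rfl | rfl <;> rcases hb with rfl | rfl
    · exact absurd rfl hab
    · exact Or.inl rfl
    · exact Or.inr rfl
    · exact absurd rfl hab

theorem nodup_one {α : Type} {l : List α} {u : α} (hnd : l.Nodup)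
    (hall : ∀ x ∈ l, x = u) (hu : u ∈ l) : l = [u] := by
  match l with
  | [] => cases hu
  | [a] => rw [hall a (by simp)]
  | a :: b :: rest =>
    rw [List.nodup_cons] at hnd
    have ha := hall a (by simp)
    have hb := hall b (by simp)
    exact absurd (by simp [ha.trans hb.symm]) hnd.1


theorem fix_eq_normalize (pt : List (String × Int))
    (h : pvValidTones (pt.map Prod.snd) = true) :
    fixPhoneTone pt = some (bNormalize pt) := by
  have hnd : (PySem.Set.ofList (pt.map Prod.snd)).Nodup := PySem.Set.nodup_ofList _
  unfold pvValidTones at h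
  simp only [Bool.and_eq_true, Bool.or_eq_true, List.all_eq_true, beq_iff_eq,
    Bool.not_eq_eq_eq_not, Bool.not_true, List.isEmpty_eq_false_iff, List.contains_iff_mem] at h
  obtain ⟨hne, hc⟩ := h
  unfold fixPhoneTone
  rcases hc with (hall | ⟨⟨hall, h0⟩, h1⟩) | ⟨⟨hall, h0⟩, hm1⟩
  · -- all tones 0
    have h0 : (0 : Int) ∈ pt.map Prod.snd := by
      rcases List.exists_mem_of_ne_nil _ hne with ⟨x, hx⟩
      exact hall x hx ▸ hx
    have hS : PySem.Set.ofList (pt.map Prod.snd) = [0] :=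
      nodup_one hnd (fun x hx => hall x ((PySem.Set.mem_ofList _ _).mp hx))
        ((PySem.Set.mem_ofList _ _).mpr h0)
    rw [hS]
    have hno : pt.any (fun lt => lt.2 = -1) = false := by
      simp only [List.any_eq_false, decide_eq_true_eq]
      intro lt hlt
      have := hall lt.2 (List.mem_map_of_mem hlt)
      omega
    simp [pySetEq, bNormalize, hno]
  · -- tone set {0,1}
    have hS := nodup_two (u := (0:Int)) (v := 1) hnd
      (fun x hx => hall x ((PySem.Set.mem_ofList _ _).mp hx))
      ((PySem.Set.mem_ofList _ _).mpr h0) ((PySem.Set.mem_ofList _ _).mpr h1) (by norm_num)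
    have hno : pt.any (fun lt => lt.2 = -1) = false := by
      simp only [List.any_eq_false, decide_eq_true_eq]
      intro lt hlt
      have := hall lt.2 (List.mem_map_of_mem hlt)
      omega
    rcases hS with hS | hS <;> rw [hS] <;> simp [pySetEq, bNormalize, hno]
  · -- tone set {-1,0}
    have hS := nodup_two (u := (0:Int)) (v := -1) hnd
      (fun x hx => (hall x ((PySem.Set.mem_ofList _ _).mp hx)).symm)
      ((PySem.Set.mem_ofList _ _).mpr h0) ((PySem.Set.mem_ofList _ _).mpr hm1) (by norm_num)
    have hyes : pt.any (fun lt => lt.2 = -1) = true := by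
      rw [List.any_eq_true]
      rcases List.mem_map.mp hm1 with ⟨lt, hlt, he⟩
      exact ⟨lt, hlt, by simp [he]⟩
    rcases hS with hS | hS <;> rw [hS] <;> simp [pySetEq, bNormalize, hyes]

-- running A's loop across a boundary-free, '^'-free block = B's segment fold
theorem aLoop_seg : ∀ (seg : List String), (∀ t ∈ seg, pvBoundary t = false ∧ t ≠ "^") →
    ∀ (n i : Nat) (rest : List String) (R P : List (String × Int)) (c : Int) (l : String),
    aLoop n i (seg ++ rest) R P c l =
      aLoop n (i + seg.length) rest R (seg.foldl bStep (c, l, P)).2.2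
        (seg.foldl bStep (c, l, P)).1 (seg.foldl bStep (c, l, P)).2.1 := by
  intro seg
  induction seg with
  | nil => intro _ n i rest R P c l; simp
  | cons t s ih =>
    intro h n i rest R P c l
    obtain ⟨hb, hc⟩ := h t (by simp)
    have hih := ih (fun x hx => h x (by simp [hx]))
    have hnb : ¬(t = "$" ∨ t = "?" ∨ t = "_" ∨ t = "#") := by
      unfold pvBoundary at hb
      simp only [Bool.or_eq_false_iff, beq_eq_false_iff_ne, ne_eq] at hb
      tauto
    have harith : ∀ k : Nat, i + 1 + k = i + (k + 1) := fun k => by omega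
    simp only [List.cons_append, List.foldl_cons, List.length_cons]
    rw [aLoop_cons, if_neg hc, if_neg hnb]
    by_cases h1 : t = "["
    · rw [if_pos h1, hih n (i + 1) rest R P (if l = "[" then c else c + 1) "[", harith]
      simp [bStep, h1]
    · by_cases h2 : t = "]"
      · rw [if_neg h1, if_pos h2,
          hih n (i + 1) rest R P (if l = "]" then c else c - 1) "]", harith]
        simp [bStep, h2]
      · rw [if_neg h1, if_neg h2,
          hih n (i + 1) rest R (P ++ [(if t = "cl" then "q" else t, c)]) c l, harith]
        simp [bStep, if_neg h1, if_neg h2]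

theorem aLoop_main : ∀ (m : Nat) (toks : List String), toks.length ≤ m →
    ∀ (n i : Nat) (R : List (String × Int)),
    i + toks.length = n →
    "^" ∉ toks →
    pvTermOk toks = true →
    (∀ s ∈ pvChunks [] toks, pvValidTones (pvSegTones s) = true) →
    aLoop n i toks R [] 0 "" =
      some (R ++ ((pvChunks [] toks).map fun seg => bNormalize (bSegPhones seg)).flatten) := by
  intro m
  induction m with
  | zero =>
    intro toks hlen n i R hinv hhat hterm hval
    have : toks = [] := List.eq_nil_of_length_eq_zero (Nat.le_zero.mp hlen)
    subst this
    simp [aLoop_nil, pvChunks]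
  | succ m ih =>
    intro toks hlen n i R hinv hhat hterm hval
    rcases hsf : splitFirst toks with _ | ⟨⟨seg, b, rest⟩⟩
    · -- no boundary marker: nothing is ever flushed
      have hnb := splitFirst_none hsf
      have hchunks : pvChunks [] toks = [] := pvChunks_noB hnb []
      have hseg : ∀ t ∈ toks, pvBoundary t = false ∧ t ≠ "^" :=
        fun t ht => ⟨hnb t ht, fun he => hhat (he ▸ ht)⟩
      have hrun := aLoop_seg toks hseg n i [] R [] 0 ""
      rw [List.append_nil] at hrun
      rw [hrun, hchunks]
      simp [aLoop_nil]
    · obtain ⟨htoks, hsegnb, hbB⟩ := splitFirst_some hsf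
      subst htoks
      have hsegh : ∀ t ∈ seg, pvBoundary t = false ∧ t ≠ "^" :=
        fun t ht => ⟨hsegnb t ht, fun he => hhat (List.mem_append_left _ (he ▸ ht))⟩
      have hchunks : pvChunks [] (seg ++ b :: rest) = seg :: pvChunks [] rest := by
        simpa using pvChunks_split hsegnb hbB [] rest
      have hbne : b ≠ "^" := by
        intro he; rw [he] at hbB; exact absurd hbB (by decide)
      have hbor : b = "$" ∨ b = "?" ∨ b = "_" ∨ b = "#" := by
        unfold pvBoundary at hbB
        simp only [Bool.or_eq_true, beq_iff_eq] at hbB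
        tauto
      have hfix : fixPhoneTone (seg.foldl bStep (0, "", [])).2.2 =
          some (bNormalize (bSegPhones seg)) := by
        rw [show (seg.foldl bStep ((0:Int), "", ([]:List (String × Int)))).2.2 = bSegPhones seg from rfl]
        refine fix_eq_normalize _ ?_
        rw [← segTones_eq]
        exact hval seg (by rw [hchunks]; simp)
      rw [aLoop_seg seg hsegh n i (b :: rest) R [] 0 ""]
      rw [pvTermOk_skip hsegnb, pvTermOk_cons] at hterm
      have hterm_rest : pvTermOk rest = true ∧
          ¬((b = "$" ∨ b = "?") ∧ i + seg.length ≠ n - 1) := by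
        by_cases hbt : (b == "$" || b == "?") = true
        · rw [if_pos hbt] at hterm
          have hre : rest = [] := List.isEmpty_iff.mp hterm
          subst hre
          have hlen2 : i + seg.length + 1 = n := by
            simp only [List.length_append, List.length_cons, List.length_nil] at hinv
            omega
          exact ⟨rfl, fun hc => hc.2 (by omega)⟩
        · rw [if_neg hbt] at hterm
          simp only [Bool.or_eq_true, beq_iff_eq, not_or] at hbt
          exact ⟨hterm, fun hc => by tauto⟩
      rw [aLoop_cons, if_neg hbne, if_pos hbor, hfix]
      simp only []
      rw [if_neg hterm_rest.2]
      have hlen3 : rest.length ≤ m := by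
        have := hlen
        simp only [List.length_append, List.length_cons] at this
        omega
      have hinv3 : i + seg.length + 1 + rest.length = n := by
        simp only [List.length_append, List.length_cons] at hinv
        omega
      have hhat3 : "^" ∉ rest :=
        fun hm => hhat (List.mem_append_right _ (List.mem_cons_of_mem _ hm))
      have hval3 : ∀ s ∈ pvChunks [] rest, pvValidTones (pvSegTones s) = true :=
        fun s hs => hval s (by rw [hchunks]; exact List.mem_cons_of_mem _ hs)
      rw [ih rest hlen3 n (i + seg.length + 1) (R ++ bNormalize (bSegPhones seg))
        hinv3 hhat3 hterm_rest.1 hval3]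
      rw [hchunks]
      simp

-- ===== VERDICT (by name: the statement is the Claim_ definition above) =====
theorem g2phone_tone_wo_punct_spec : Claim_equal_g2phone_tone_wo_punct := by
  intro prosodies hdom hpre
  unfold Pre_g2phone_tone_wo_punct at hpre
  unfold Spec_g2phone_tone_wo_punct g2phone_tone_wo_punct g2phone_tone_wo_punct_alt
  by_cases hh : prosodies.take 1 = ["^"]
  · obtain ⟨tl, rfl⟩ : ∃ tl, prosodies = "^" :: tl := by
      rcases prosodies with _ | ⟨a, tl⟩
      · simp at hh
      · simp only [List.take_succ_cons, List.take_zero, List.cons.injEq, and_true] at hh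
        exact ⟨tl, by rw [hh]⟩
    rw [if_pos hh] at hpre ⊢
    obtain ⟨hhat, hidx, hvalS⟩ := hpre
    simp only [List.tail_cons] at hhat hidx hvalS ⊢
    have hterm := termOk_of_idx _ hidx
    have hval : ∀ s ∈ pvChunks [] tl, pvValidTones (pvSegTones s) = true := fun s hs =>
      hvalS s (by rwa [splitOnP_dropLast_eq_pvChunks' tl])
    have hstep : aLoop ("^" :: tl).length 0 ("^" :: tl) [] [] 0 "" =
        aLoop ("^" :: tl).length 1 tl [] [] 0 "" := by
      rw [aLoop_cons]
      simp
    rw [hstep, aLoop_main tl.length tl le_rfl ("^" :: tl).length 1 []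
      (by simp [Nat.add_comm]) hhat hterm hval]
    simp [bChunks_eq_pvChunks]
  · rw [if_neg hh] at hpre ⊢
    obtain ⟨hhat, hidx, hvalS⟩ := hpre
    have hterm := termOk_of_idx _ hidx
    have hval : ∀ s ∈ pvChunks [] prosodies, pvValidTones (pvSegTones s) = true := fun s hs =>
      hvalS s (by rwa [splitOnP_dropLast_eq_pvChunks' prosodies])
    rw [aLoop_main prosodies.length prosodies le_rfl prosodies.length 0 []
      (by simp) hhat hterm hval]
    simp [bChunks_eq_pvChunks]
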